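-- pv_equiv track=rewrite | github.com/yyuan29/project001 | markdown_compiler/util/line_functions.py | compile_italic_star
-- ===== SOURCE A (Python) =====
-- def compile_italic_star(line):
--     '''
--     Convert "*italic*" into "<i>italic</i>".
--
--     HINT:
--     Italics require carefully tracking the beginning and ending positions
--     of the text to be replaced.
--     This is similar to the `delete_HTML` function that we implemented in class.
--     It's a tiny bit more complicated since we are not
--     just deleting substrings from the text,
--     but also adding replacement substrings.
--
--     >>> compile_italic_star('*This is italic!* This is not italic.')
--     '<i>This is italic!</i> This is not italic.'
--     >>> compile_italic_star('*This is italic!*')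
--     '<i>This is italic!</i>'
--     >>> compile_italic_star('This is *italic*!')
--     'This is <i>italic</i>!'
--     >>> compile_italic_star('This is not *italic!')
--     'This is not *italic!'
--     >>> compile_italic_star('*')
--     '*'
--     '''
--     result = ""
--     i = 0
--     while i < len(line):
--         if line[i:i + 1] == "*" and line.find("*", i + 1) != -1:
--             end = line.find("*", i + 1)
--             if end != -1:
--                 result += "<i>" + line[i + 1: end] + "</i>"
--                 i = end + 1
--             else:
--                 result += line[i]
--                 i += 1
--         else:
--             result += line[i]
--             i += 1
--
--     return result
-- ===== SOURCE B (Python) =====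
-- def compile_italic_star(line):
--     # Single left-to-right pass (state machine) instead of repeated str.find scans.
--     out = []
--     buf = []            # chars seen since an unmatched opening '*'
--     open_star = False
--     for ch in line:
--         if ch == '*':
--             if open_star:
--                 out.append('<i>' + ''.join(buf) + '</i>')
--                 buf = []
--                 open_star = False
--             else:
--                 open_star = True
--         elif open_star:
--             buf.append(ch)
--         else:
--             out.append(ch)
--     if open_star:
--         out.append('*' + ''.join(buf))
--     return ''.join(out)
-- ===== Notes on version B (the rewrite author's own statement) =====
-- stated objective: faster
-- what changed: Replaced the quadratic rescan (str.find for the closing '*' plus string concatenation at every position) with a single left-to-right state-machine pass that buffers characters after an unmatched '*' and joins the pieces once.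
import Mathlib
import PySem

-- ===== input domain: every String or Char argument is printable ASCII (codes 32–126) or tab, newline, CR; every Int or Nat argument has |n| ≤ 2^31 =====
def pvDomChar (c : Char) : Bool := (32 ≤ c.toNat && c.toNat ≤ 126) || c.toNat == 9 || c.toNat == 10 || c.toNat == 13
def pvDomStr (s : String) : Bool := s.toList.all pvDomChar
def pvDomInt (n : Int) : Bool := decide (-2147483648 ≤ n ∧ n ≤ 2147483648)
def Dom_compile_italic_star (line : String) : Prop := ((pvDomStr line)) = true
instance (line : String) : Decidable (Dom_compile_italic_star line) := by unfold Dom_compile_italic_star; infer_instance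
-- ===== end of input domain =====

-- B is a single-pass state machine over the characters; A rescans with str.find at each '*'.
-- Equivalence of the RETURN VALUES is proved for all inputs (both functions are total).

-- ===== PORT A =====
-- The while loop over index i is transcribed as recursion on the suffix line[i:]:
-- line[i:i+1] == "*" is the head test, line.find("*", i+1) is Chars.find on the suffix
-- (the Python index is absolute, here relative to the suffix — same occurrence),
-- line[i+1:end] / i = end+1 are the corresponding slices of the suffix.
def goA : List Char → List Char
  | [] => []
  | c :: rest =>
    let f := PySem.Chars.find rest ['*']
    if c = '*' ∧ f ≠ -1 then
      if f ≠ -1 then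
        '<' :: 'i' :: '>' :: (PySem.List.slice rest none (some f)
          ++ '<' :: '/' :: 'i' :: '>' :: goA (PySem.List.slice rest (some (f + 1)) none))
      else c :: goA rest
    else c :: goA rest
  termination_by cs => cs.length
  decreasing_by
    · rw [PySem.List.slice_some_none]; simp
    · simp
    · simp

def compile_italic_star (line : String) : String :=
  String.ofList (goA line.toList)

-- ===== PORT B =====
-- state machine from Source B: opn = open_star, buf = chars since the unmatched '*';
-- out.append / final ''.join(out) become list construction / flattening.
def goB : List Char → Bool → List Char → List Char
  | [], opn, buf => if opn then '*' :: buf else []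
  | ch :: rest, opn, buf =>
    if ch = '*' then
      if opn then
        '<' :: 'i' :: '>' :: (buf ++ '<' :: '/' :: 'i' :: '>' :: goB rest false [])
      else goB rest true buf
    else if opn then goB rest opn (buf ++ [ch])
    else ch :: goB rest opn buf

def compile_italic_star_alt (line : String) : String :=
  String.ofList (goB line.toList false [])

-- ===== PRECONDITION & SPEC =====
def Spec_compile_italic_star (line : String) (out : String) : Prop := out = compile_italic_star_alt line
instance (line : String) (out : String) : Decidable (Spec_compile_italic_star line out) := by unfold Spec_compile_italic_star; infer_instance

-- ===== CLAIM (what is proved, stated in full; the proofs are below) =====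
def Claim_equal_compile_italic_star : Prop := ∀ (line : String), Dom_compile_italic_star line → Spec_compile_italic_star line (compile_italic_star line)

-- ===== LEMMAS AND PROOFS =====

-- first occurrence decomposition
theorem first_star_split {cs : List Char} (h : '*' ∈ cs) :
    ∃ a b, cs = a ++ '*' :: b ∧ '*' ∉ a := by
  induction cs with
  | nil => cases h
  | cons c t ih =>
    by_cases hc : c = '*'
    · exact ⟨[], t, by simp [hc], by simp⟩
    · have ht : '*' ∈ t := by
        rcases List.mem_cons.mp h with h' | h'
        · exact absurd h'.symm hc
        · exact h'
      rcases ih ht with ⟨a, b, hab, hna⟩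
      refine ⟨c :: a, b, by simp [hab], ?_⟩
      intro hm
      rcases List.mem_cons.mp hm with h' | h'
      · exact hc h'.symm
      · exact hna h'

theorem infix_singleton_iff (c : Char) (s : List Char) : [c] <:+: s ↔ c ∈ s := by
  constructor
  · intro h; exact List.singleton_sublist.mp h.sublist
  · intro h
    rcases List.append_of_mem h with ⟨a, b, rfl⟩
    exact ⟨a, b, by simp⟩

theorem find_star_eq_neg_one {b : List Char} (h : '*' ∉ b) :
    PySem.Chars.find b ['*'] = -1 := by
  rw [PySem.Chars.find_eq_neg_one_iff]
  rw [infix_singleton_iff]; exact h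

theorem find_star_split {b1 b2 : List Char} (h : '*' ∉ b1) :
    PySem.Chars.find (b1 ++ '*' :: b2) ['*'] = (b1.length : Int) := by
  have hmem : '*' ∈ b1 ++ '*' :: b2 := by simp
  have h0 : 0 ≤ PySem.Chars.find (b1 ++ '*' :: b2) ['*'] := by
    rw [PySem.Chars.find_nonneg_iff, infix_singleton_iff]; exact hmem
  obtain ⟨hpre, hmin⟩ := PySem.Chars.find_spec h0
  set f := PySem.Chars.find (b1 ++ '*' :: b2) ['*'] with hf
  have hdropb1 : (b1 ++ '*' :: b2).drop b1.length = '*' :: b2 := by simp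
  have hle : f.toNat ≤ b1.length := by
    by_contra hgt
    push_neg at hgt
    exact hmin b1.length hgt (by rw [hdropb1]; exact ⟨b2, rfl⟩)
  have hge : ¬ f.toNat < b1.length := by
    intro hlt
    obtain ⟨t, ht⟩ := hpre
    have hget : (b1 ++ '*' :: b2)[f.toNat]? = some '*' := by
      have h2 := congrArg (fun l : List Char => l[0]?) ht
      simpa [List.getElem?_drop] using h2.symm
    rw [List.getElem?_append_left (by exact hlt)] at hget
    exact h (List.mem_of_getElem? hget)
  have : f.toNat = b1.length := by omega
  omega

theorem goA_skip {a : List Char} (h : '*' ∉ a) (rest : List Char) :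
    goA (a ++ rest) = a ++ goA rest := by
  induction a with
  | nil => simp
  | cons c t ih =>
    have hc : ¬ c = '*' := fun hh => h (by simp [hh])
    have ht : '*' ∉ t := fun hh => h (by simp [hh])
    rw [List.cons_append, goA]
    simp only [hc, false_and, ih ht, List.cons_append]
    simp

theorem goB_skip {a : List Char} (h : '*' ∉ a) (rest : List Char) :
    goB (a ++ rest) false [] = a ++ goB rest false [] := by
  induction a with
  | nil => simp
  | cons c t ih =>
    have hc : ¬ c = '*' := fun hh => h (by simp [hh])
    have ht : '*' ∉ t := fun hh => h (by simp [hh])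
    rw [List.cons_append, goB]
    simp [hc, ih ht]

theorem goB_buf {b1 : List Char} (h : '*' ∉ b1) (rest buf : List Char) :
    goB (b1 ++ rest) true buf = goB rest true (buf ++ b1) := by
  induction b1 generalizing buf with
  | nil => simp
  | cons c t ih =>
    have hc : ¬ c = '*' := fun hh => h (by simp [hh])
    have ht : '*' ∉ t := fun hh => h (by simp [hh])
    rw [List.cons_append, goB, if_neg hc]
    simp only [if_true]
    rw [ih ht]
    simp

theorem goA_nostar {b : List Char} (h : '*' ∉ b) : goA b = b := by
  have h1 := goA_skip h []
  have h2 : goA ([] : List Char) = [] := by rw [goA]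
  rw [h2] at h1
  simpa using h1

theorem main_equiv : ∀ (n : Nat) (cs : List Char), cs.length ≤ n →
    goA cs = goB cs false [] := by
  intro n
  induction n with
  | zero =>
    intro cs hcs
    have : cs = [] := List.eq_nil_of_length_eq_zero (by omega)
    subst this
    rw [goA]
    rfl
  | succ n ih =>
    intro cs hcs
    by_cases hmem : '*' ∈ cs
    · obtain ⟨a, b, rfl, hna⟩ := first_star_split hmem
      rw [goA_skip hna, goB_skip hna]
      congr 1
      rw [goB]
      simp only [Bool.false_eq_true, if_false]
      by_cases hb : '*' ∈ b
      · obtain ⟨b1, b2, rfl, hnb1⟩ := first_star_split hb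
        rw [goA]
        simp only [find_star_split hnb1]
        have hne : ((b1.length : Int)) ≠ -1 := by omega
        rw [if_pos ⟨trivial, hne⟩, if_pos hne]
        have hslice1 : PySem.List.slice (b1 ++ '*' :: b2) none (some (b1.length : Int)) = b1 := by
          rw [PySem.List.slice_to]
          · simp
          · omega
        have hslice2 : PySem.List.slice (b1 ++ '*' :: b2) (some ((b1.length : Int) + 1)) none = b2 := by
          rw [PySem.List.slice_from]
          · have h3 : ((b1.length : Int) + 1).toNat = b1.length + 1 := by omega
            rw [h3, show b1 ++ '*' :: b2 = (b1 ++ ['*']) ++ b2 by simp]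
            simp
          · omega
        rw [hslice1, hslice2]
        rw [goB_buf hnb1, goB]
        simp only [if_true]
        have hlen : b2.length ≤ n := by
          simp [List.length_append] at hcs
          omega
        rw [ih b2 hlen]
        simp
      · rw [goA]
        simp only [find_star_eq_neg_one hb]
        rw [if_neg (by simp)]
        rw [goA_nostar hb]
        rw [show b = b ++ [] by simp, goB_buf hb, goB]
        simp
    · rw [goA_nostar hmem]
      have h1 := goB_skip hmem []
      have h2 : goB ([] : List Char) false [] = [] := rfl
      rw [h2] at h1
      simpa using h1.symm

-- ===== VERDICT (by name: the statement is the Claim_ definition above) =====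
theorem compile_italic_star_spec : Claim_equal_compile_italic_star := by
  intro line _
  unfold Spec_compile_italic_star compile_italic_star compile_italic_star_alt
  rw [main_equiv line.toList.length line.toList le_rfl]
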